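-- pv_equiv track=rewrite | github.com/anthonypoon12/unscramble- | unscramble!2/bulk.py | check
-- ===== SOURCE A (Python) =====
-- def check(a,theinput1):
--     checker=theinput1
--     for y in a:
--         if y in checker:
--             checker=checker[:checker.find(y)]+checker[checker.find(y)+1:]
--         else:
--             return 0
--     return 1
-- ===== SOURCE B (Python) =====
-- def check(a, theinput1):
--     sorted_a = sorted(a)
--     sorted_in = sorted(theinput1)
--     j = 0
--     n = len(sorted_in)
--     for c in sorted_a:
--         while j < n and sorted_in[j] < c:
--             j += 1
--         if j == n or sorted_in[j] != c:
--             return 0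
--         j += 1
--     return 1
-- ===== Notes on version B (the rewrite author's own statement) =====
-- stated objective: faster
-- what changed: Replace the per-character scan-and-rebuild of the remaining string (find + two slices for every character of a) by sorting both strings once and checking containment with a single linear two-pointer merge pass.
import Mathlib
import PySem

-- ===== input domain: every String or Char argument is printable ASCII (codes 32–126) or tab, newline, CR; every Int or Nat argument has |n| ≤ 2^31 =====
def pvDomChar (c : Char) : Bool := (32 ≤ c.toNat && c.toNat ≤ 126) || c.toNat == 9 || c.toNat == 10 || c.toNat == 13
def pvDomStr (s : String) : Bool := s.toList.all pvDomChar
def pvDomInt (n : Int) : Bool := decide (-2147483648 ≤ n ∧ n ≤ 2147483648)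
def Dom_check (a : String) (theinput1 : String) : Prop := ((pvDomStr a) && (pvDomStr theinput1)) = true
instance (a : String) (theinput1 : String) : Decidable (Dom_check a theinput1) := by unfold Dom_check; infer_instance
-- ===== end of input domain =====

-- B sorts both strings once and does one two-pointer merge pass instead of A's
-- per-character find+slice rebuild of the remaining string; return value only (no mutation in either).

-- ===== PORT A =====
-- A's loop: for y in a, if y is in the remaining string remove its first
-- occurrence (checker[:find(y)] + checker[find(y)+1:]), else return 0.
def checkLoop : List Char → List Char → Int
  | [], _ => 1
  | y :: ys, checker =>
    if y ∈ checker then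
      -- checker.find(y): first index of y (y ∈ checker, so index? is some)
      let i : Int := ((PySem.List.index? checker y).getD 0 : Nat)
      checkLoop ys (PySem.List.slice checker none (some i) ++
                    PySem.List.slice checker (some (i + 1)) none)
    else 0

def check (a : String) (theinput1 : String) : Int :=
  checkLoop a.toList theinput1.toList

-- ===== PORT B =====
-- Source B's merge pass: skip smaller elements of sorted_in (the while loop),
-- consume a match, otherwise return 0.
def mergeLoop : List Char → List Char → Int
  | [], _ => 1
  | _ :: _, [] => 0
  | c :: cs, d :: ds =>
    if d < c then mergeLoop (c :: cs) ds
    else if d = c then mergeLoop cs ds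
    else 0
termination_by cs ds => cs.length + ds.length

def check_alt (a : String) (theinput1 : String) : Int :=
  mergeLoop (PySem.List.sorted a.toList (fun x => x) false)
            (PySem.List.sorted theinput1.toList (fun x => x) false)

-- ===== PRECONDITION & SPEC =====
def Spec_check (a : String) (theinput1 : String) (out : Int) : Prop := out = check_alt a theinput1
instance (a : String) (theinput1 : String) (out : Int) : Decidable (Spec_check a theinput1 out) := by unfold Spec_check; infer_instance

-- ===== CLAIM (what is proved, stated in full; the proofs are below) =====
def Claim_equal_check : Prop := ∀ (a : String) (theinput1 : String), Dom_check a theinput1 → Spec_check a theinput1 (check a theinput1)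

-- ===== LEMMAS AND PROOFS =====

-- the slice pair A builds is List.erase of the first occurrence
theorem slice_pair_eq_erase (c : List Char) (y : Char) (hy : y ∈ c) :
    PySem.List.slice c none (some (((PySem.List.index? c y).getD 0 : Nat) : Int)) ++
    PySem.List.slice c (some ((((PySem.List.index? c y).getD 0 : Nat) : Int) + 1)) none
      = c.erase y := by
  obtain ⟨k, hk⟩ := (PySem.List.index?_isSome_iff (xs := c) (v := y)).mpr hy |> Option.isSome_iff_exists.mp
  obtain ⟨pre, suf, hc, hlen, hpre⟩ := (PySem.List.index?_eq_some_iff c y k).mp hk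
  rw [hk]
  simp only [Option.getD_some]
  have h1 : ((k : Int) + 1) = ((k + 1 : Nat) : Int) := by push_cast; ring
  rw [h1, PySem.List.slice_to_natCast, PySem.List.slice_from_natCast]
  subst hc hlen
  rw [List.erase_append_right _ hpre, List.erase_cons_head]
  simp [List.drop_append]


-- A's loop decides multiset containment of the remaining characters
theorem checkLoop_eq (ys : List Char) :
    ∀ c : List Char, checkLoop ys c = if (ys : Multiset Char) ≤ (c : Multiset Char) then 1 else 0 := by
  induction ys with
  | nil => intro c; simp [checkLoop]
  | cons y ys ih =>
    intro c
    rw [checkLoop]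
    by_cases hy : y ∈ c
    · rw [if_pos hy]
      show checkLoop ys (PySem.List.slice c none (some ((((PySem.List.index? c y).getD 0 : Nat)) : Int)) ++ PySem.List.slice c (some (((((PySem.List.index? c y).getD 0 : Nat)) : Int) + 1)) none) = _
      rw [slice_pair_eq_erase c y hy, ih]
      have hco : (y ::ₘ (c.erase y : Multiset Char)) = (c : Multiset Char) := by
        rw [← Multiset.coe_erase]
        exact Multiset.cons_erase (by simpa using hy)
      have : ((y :: ys : List Char) : Multiset Char) ≤ (c : Multiset Char) ↔
          (ys : Multiset Char) ≤ ((c.erase y : List Char) : Multiset Char) := by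
        rw [← hco]; simp only [← Multiset.cons_coe]
        exact Multiset.cons_le_cons_iff y
      simp only [this]
    · rw [if_neg hy, if_neg]
      intro h
      exact hy (by simpa using Multiset.mem_of_le h (by simp))

theorem le_cons_iff_of_count_zero {α : Type} [DecidableEq α] {s t : Multiset α} {d : α}
    (h : s.count d = 0) : s ≤ d ::ₘ t ↔ s ≤ t := by
  constructor
  · intro hle
    rw [Multiset.le_iff_count] at *
    intro x
    have hx' := hle x
    by_cases hx : x = d
    · subst hx; simp [h]
    · simpa [Multiset.count_cons, hx] using hx'
  · intro hle; exact hle.trans (Multiset.le_cons_self t d)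


-- B's merge decides multiset containment on sorted inputs
theorem mergeLoop_eq : ∀ (cs ds : List Char), cs.Pairwise (· ≤ ·) → ds.Pairwise (· ≤ ·) →
    mergeLoop cs ds = if (cs : Multiset Char) ≤ (ds : Multiset Char) then 1 else 0 := by
  intro cs ds
  induction ds generalizing cs with
  | nil =>
    intro hcs _
    cases cs with
    | nil => simp [mergeLoop]
    | cons c cs' =>
      rw [mergeLoop, if_neg]
      simp only [Multiset.coe_nil, Multiset.le_zero]
      simp
  | cons d ds' ih =>
    intro hcs hds
    cases cs with
    | nil => simp [mergeLoop]
    | cons c cs' =>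
      rw [mergeLoop]
      rcases lt_trichotomy d c with hlt | heq | hgt
      · rw [if_pos hlt, ih _ hcs (List.Pairwise.sublist (List.sublist_cons_self d ds') hds)]
        have hcount : ((c :: cs' : List Char) : Multiset Char).count d = 0 := by
          rw [Multiset.count_eq_zero]
          intro hmem
          rcases (by simpa using hmem : d = c ∨ d ∈ cs') with h | h
          · exact absurd hlt (by simp [h])
          · exact absurd (lt_of_lt_of_le hlt (List.rel_of_pairwise_cons hcs h)) (lt_irrefl d)
        have hiff : c ::ₘ (cs' : Multiset Char) ≤ d ::ₘ (ds' : Multiset Char) ↔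
            c ::ₘ (cs' : Multiset Char) ≤ (ds' : Multiset Char) :=
          le_cons_iff_of_count_zero (by simpa using hcount)
        simp only [← Multiset.cons_coe]
        simp only [hiff]
        split_ifs <;> rfl
      · subst heq
        rw [if_neg (lt_irrefl d), if_pos rfl,
            ih _ (hcs.sublist (List.sublist_cons_self d cs')) (hds.sublist (List.sublist_cons_self d ds'))]
        have hiff : ((d :: cs' : List Char) : Multiset Char) ≤ ((d :: ds' : List Char) : Multiset Char) ↔
            (cs' : Multiset Char) ≤ (ds' : Multiset Char) := by
          simp only [← Multiset.cons_coe]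
          exact Multiset.cons_le_cons_iff d
        simp only [hiff]
      · rw [if_neg (asymm hgt), if_neg (ne_of_gt hgt), if_neg]
        intro hle
        have hc : c ∈ (d :: ds' : List Char) := by
          simpa using Multiset.mem_of_le hle (by simp)
        rcases List.mem_cons.mp hc with h | h
        · exact absurd hgt (by simp [h])
        · exact absurd (lt_of_lt_of_le hgt (List.rel_of_pairwise_cons hds h)) (lt_irrefl c)

-- ===== VERDICT (by name: the statement is the Claim_ definition above) =====
theorem check_spec : Claim_equal_check := by
  intro a t _
  unfold Spec_check check check_alt
  rw [checkLoop_eq, mergeLoop_eq _ _ (PySem.List.sorted_pairwise _ _) (PySem.List.sorted_pairwise _ _)]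
  congr 2 <;>
    exact (Multiset.coe_eq_coe.mpr (PySem.List.sorted_perm _ _ _)).symm
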